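-- pv_equiv track=rewrite | github.com/austral-prog/tp-7-MartiNogueira | loops_and_print.py | enumerate_backwards
-- ===== SOURCE A (Python) =====
-- def enumerate_backwards(list):
--     result = []
--     count = 0
--     for index, value in enumerate(list):
--         if value:  #Solo toma los valores que no estan vacios
--             result.append(f"{count}. {value[::-1]}")
--             count += 1
--     return result
-- ===== SOURCE B (Python) =====
-- def enumerate_backwards(list):
--     # Different traversal: count truthy values first, then walk the list
--     # RIGHT-TO-LEFT, assigning indices counting DOWN, and reverse at the end.
--     k = 0
--     for v in list:
--         if v:
--             k += 1
--     out = []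
--     for v in reversed(list):
--         if v:
--             k -= 1
--             out.append(f"{k}. {v[::-1]}")
--     out.reverse()
--     return out
-- ===== Notes on version B (the rewrite author's own statement) =====
-- stated objective: alternative
-- what changed: Builds the output back-to-front: a first pass counts the truthy values, then a right-to-left pass assigns indices counting down from that total and the collected lines are reversed at the end, instead of A's single left-to-right pass with an incrementing counter.
import Mathlib
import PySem

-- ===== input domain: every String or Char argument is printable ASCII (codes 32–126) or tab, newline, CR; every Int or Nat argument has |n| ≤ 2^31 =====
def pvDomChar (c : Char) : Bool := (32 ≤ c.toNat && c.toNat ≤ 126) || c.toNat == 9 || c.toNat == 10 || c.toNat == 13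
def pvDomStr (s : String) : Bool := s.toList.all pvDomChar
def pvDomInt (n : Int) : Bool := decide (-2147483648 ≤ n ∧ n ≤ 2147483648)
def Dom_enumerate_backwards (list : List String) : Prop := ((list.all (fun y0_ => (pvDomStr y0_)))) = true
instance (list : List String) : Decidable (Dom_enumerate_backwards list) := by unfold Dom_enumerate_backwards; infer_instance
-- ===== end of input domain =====

-- B builds the output back-to-front (count pass, then right-to-left pass with a
-- decrementing index, then a final reverse); objective: alternative, same cost.

-- ===== PORT A =====
-- A: one left-to-right pass with an explicit count accumulator.  value[::-1] is
-- ported as String.ofList value.toList.reverse (exact for Python's s[::-1]).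
def enumerate_backwards (list : List String) : List String :=
  (list.foldl
    (fun (st : List String × Int) value =>
      if value.toList ≠ [] then
        (st.1 ++ [PySem.Int.toStr st.2 ++ ". " ++ String.ofList value.toList.reverse], st.2 + 1)
      else st)
    ([], 0)).1

-- ===== PORT B =====
-- B: count the truthy values, then fold over the REVERSED list with the index
-- counting down, appending lines; finally reverse the collected lines.
def enumerate_backwards_alt (list : List String) : List String :=
  let k : Int := list.foldl (fun n v => if v.toList ≠ [] then n + 1 else n) 0
  let st := list.reverse.foldl
    (fun (st : Int × List String) v =>
      if v.toList ≠ [] then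
        (st.1 - 1, st.2 ++ [PySem.Int.toStr (st.1 - 1) ++ ". " ++ String.ofList v.toList.reverse])
      else st)
    (k, [])
  st.2.reverse

-- ===== PRECONDITION & SPEC =====
def Spec_enumerate_backwards (list : List String) (out : List String) : Prop := out = enumerate_backwards_alt list
instance (list : List String) (out : List String) : Decidable (Spec_enumerate_backwards list out) := by unfold Spec_enumerate_backwards; infer_instance

-- ===== CLAIM (what is proved, stated in full; the proofs are below) =====
def Claim_equal_enumerate_backwards : Prop := ∀ (list : List String), Dom_enumerate_backwards list → Spec_enumerate_backwards list (enumerate_backwards list)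

-- ===== LEMMAS AND PROOFS =====
-- Canonical value both ports are reduced to.
def ebCanon (l : List String) (c : Int) : List String :=
  (PySem.List.enumerate (l.filter (fun v => v.toList ≠ [])) c).map
    (fun p => PySem.Int.toStr p.1 ++ ". " ++ String.ofList p.2.toList.reverse)

theorem str_toList_nil (v : String) : v.toList = [] ↔ v = "" := by
  cases v; simp

theorem ebCanon_nil (c : Int) : ebCanon [] c = [] := by
  simp [ebCanon, PySem.List.enumerate_nil]

theorem ebCanon_cons (v : String) (t : List String) (c : Int) :
    ebCanon (v :: t) c =
      if v.toList ≠ [] then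
        (PySem.Int.toStr c ++ ". " ++ String.ofList v.toList.reverse) :: ebCanon t (c + 1)
      else ebCanon t c := by
  by_cases h : v = ""
  · subst h
    simp [ebCanon]
  · have h' : ¬ v.toList = [] := fun hh => h ((str_toList_nil v).1 hh)
    simp [ebCanon, h', h, PySem.List.enumerate_cons]

-- A's fold from state (acc, c) produces acc ++ ebCanon l c.
theorem ebA_fold (l : List String) (acc : List String) (c : Int) :
    (l.foldl
      (fun (st : List String × Int) value =>
        if value.toList ≠ [] then
          (st.1 ++ [PySem.Int.toStr st.2 ++ ". " ++ String.ofList value.toList.reverse], st.2 + 1)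
        else st)
      (acc, c)).1 = acc ++ ebCanon l c := by
  induction l generalizing acc c with
  | nil => simp [ebCanon_nil]
  | cons v t ih =>
    rw [List.foldl_cons, ebCanon_cons]
    by_cases h : v.toList = []
    · rw [if_neg (not_not_intro h), if_neg (not_not_intro h), ih]
    · rw [if_pos h, if_pos h, ih]
      simp

-- count helper of B: the fold counts the non-empty values.
theorem ebB_count (l : List String) (n : Int) :
    l.foldl (fun n v => if v.toList ≠ [] then n + 1 else n) n
      = n + ((l.filter (fun v => v.toList ≠ [])).length : Int) := by
  induction l generalizing n with
  | nil => simp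
  | cons v t ih =>
    rw [List.foldl_cons]
    by_cases h : v.toList = []
    · have h2 : v = "" := (str_toList_nil v).1 h
      rw [if_neg (not_not_intro h), ih]
      simp [h2]
    · have h2 : ¬ v = "" := fun hh => h ((str_toList_nil v).2 hh)
      rw [if_pos h, ih]
      simp [h2]
      ring

-- B's reverse fold: starting at index c + |filter l| with accumulated lines o,
-- it ends at index c having appended (ebCanon l c).reverse.
theorem ebB_fold (l : List String) (o : List String) (c : Int) :
    l.reverse.foldl
      (fun (st : Int × List String) v =>
        if v.toList ≠ [] then
          (st.1 - 1, st.2 ++ [PySem.Int.toStr (st.1 - 1) ++ ". " ++ String.ofList v.toList.reverse])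
        else st)
      (c + ((l.filter (fun v => v.toList ≠ [])).length : Int), o)
      = (c, o ++ (ebCanon l c).reverse) := by
  induction l generalizing o c with
  | nil => simp [ebCanon_nil]
  | cons v t ih =>
    rw [List.reverse_cons, List.foldl_append]
    by_cases h : v.toList = []
    · have h2 : v = "" := (str_toList_nil v).1 h
      have e : c + (((v :: t).filter (fun v => v.toList ≠ [])).length : Int)
          = c + ((t.filter (fun v => v.toList ≠ [])).length : Int) := by
        simp [h2]
      rw [e, ih]
      simp only [List.foldl_cons, List.foldl_nil, if_neg (not_not_intro h)]
      rw [ebCanon_cons, if_neg (not_not_intro h)]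
    · have h2 : ¬ v = "" := fun hh => h ((str_toList_nil v).2 hh)
      have e : c + (((v :: t).filter (fun v => v.toList ≠ [])).length : Int)
          = (c + 1) + ((t.filter (fun v => v.toList ≠ [])).length : Int) := by
        simp [h2]
        ring
      rw [e, ih]
      simp only [List.foldl_cons, List.foldl_nil, if_pos h]
      rw [ebCanon_cons, if_pos h]
      simp

theorem ebB_eq (l : List String) : enumerate_backwards_alt l = ebCanon l 0 := by
  show (l.reverse.foldl _ (l.foldl (fun n v => if v.toList ≠ [] then n + 1 else n) 0, [])).2.reverse = _
  rw [ebB_count, ebB_fold l [] 0]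
  simp

-- ===== VERDICT (by name: the statement is the Claim_ definition above) =====
theorem enumerate_backwards_spec : Claim_equal_enumerate_backwards := by
  intro list _
  unfold Spec_enumerate_backwards
  rw [ebB_eq]
  unfold enumerate_backwards
  simpa using ebA_fold list [] 0
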